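-- pv_equiv track=rewrite | github.com/etilonii/FantaPortoscuso | apps/api/app/engine/market_engine.py | games_remaining
-- ===== SOURCE A (Python) =====
-- from typing import Dict, Iterable, List, Tuple
--
-- def games_remaining(teams: Dict[str, dict], fixtures: List[dict], current_round: int) -> Dict[str, int]:
--     remaining = {k: 0 for k in teams}
--     for f in fixtures:
--         team = f.get("team")
--         if team not in remaining:
--             continue
--         if int(f.get("round", 0)) >= current_round:
--             remaining[team] += 1
--     # fallback if no fixtures: use team-provided value
--     for k, v in teams.items():
--         if remaining[k] == 0:
--             remaining[k] = int(v.get("GamesRemaining", 0) or 0)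
--     return remaining
-- ===== SOURCE B (Python) =====
-- def games_remaining(teams, fixtures, current_round):
--     result = {}
--     for k, v in teams.items():
--         cnt = sum(
--             1
--             for f in fixtures
--             if f.get("team") == k and int(f.get("round", 0)) >= current_round
--         )
--         result[k] = cnt if cnt > 0 else int(v.get("GamesRemaining", 0) or 0)
--     return result
-- ===== Notes on version B (the rewrite author's own statement) =====
-- stated objective: alternative
-- what changed: A builds a zero-initialised count dict, increments it in one pass over the fixtures and then patches zeros in a second pass over the teams; B makes a single pass over the teams and, for each team, rescans the fixtures to count its remaining games inline, applying the fallback immediately.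
import Mathlib
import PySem

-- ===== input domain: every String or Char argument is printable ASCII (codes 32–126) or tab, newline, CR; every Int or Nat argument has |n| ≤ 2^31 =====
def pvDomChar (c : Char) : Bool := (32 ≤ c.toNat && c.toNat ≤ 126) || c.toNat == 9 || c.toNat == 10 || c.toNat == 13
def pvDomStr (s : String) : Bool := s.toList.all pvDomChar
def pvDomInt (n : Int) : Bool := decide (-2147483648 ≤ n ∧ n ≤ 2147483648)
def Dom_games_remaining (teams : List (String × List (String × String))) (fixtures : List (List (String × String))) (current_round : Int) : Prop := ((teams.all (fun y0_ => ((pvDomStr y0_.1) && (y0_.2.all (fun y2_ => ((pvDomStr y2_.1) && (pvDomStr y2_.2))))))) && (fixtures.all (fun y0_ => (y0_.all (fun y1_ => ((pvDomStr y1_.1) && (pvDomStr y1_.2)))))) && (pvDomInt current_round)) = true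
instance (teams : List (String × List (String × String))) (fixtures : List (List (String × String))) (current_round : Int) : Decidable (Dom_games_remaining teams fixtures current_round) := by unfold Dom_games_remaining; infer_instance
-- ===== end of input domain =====

-- B replaces A's count-dict-then-fallback two-pass scheme by a single loop over the teams that
-- rescans the fixtures per team (objective: alternative; B is not faster, it inverts the traversal).


-- shared transliterations of Python expressions both sources contain verbatim:
-- int(f.get("round", 0))  (the .getD 0 default is only reached outside Pre_, where Python raises)
def pvRound (f : PySem.Dict String String) : Int :=
  match f.get? "round" with
  | none => 0
  | some s => (PySem.Int.ofStr? s).getD 0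
-- int(v.get("GamesRemaining", 0) or 0)
def pvFallback (v : List (String × String)) : Int :=
  match (PySem.Dict.ofList v).get? "GamesRemaining" with
  | none => 0
  | some s => if s = "" then 0 else (PySem.Int.ofStr? s).getD 0

-- ===== PORT A =====
def games_remaining (teams : List (String × List (String × String))) (fixtures : List (List (String × String))) (current_round : Int) : List (String × Int) :=
  let teamsD := PySem.Dict.ofList teams
  -- remaining = {k: 0 for k in teams}
  let remaining0 : PySem.Dict String Int :=
    teamsD.items.foldl (fun d kv => d.insert kv.1 0) PySem.Dict.empty
  -- for f in fixtures: …
  let remaining1 :=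
    fixtures.foldl (fun rem f =>
      let fD := PySem.Dict.ofList f
      match fD.get? "team" with
      | none => rem
      | some team =>
        if rem.contains team then
          if pvRound fD ≥ current_round then rem.modify team 0 (· + 1) else rem
        else rem) remaining0
  -- for k, v in teams.items(): …
  let remaining2 :=
    teamsD.items.foldl (fun rem kv =>
      if rem.getD kv.1 0 = 0 then rem.insert kv.1 (pvFallback kv.2) else rem) remaining1
  remaining2.items

-- ===== PORT B =====
def games_remaining_alt (teams : List (String × List (String × String))) (fixtures : List (List (String × String))) (current_round : Int) : List (String × Int) :=
  let fds := fixtures.map (fun f => PySem.Dict.ofList f)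
  (PySem.Dict.ofList teams).items.foldl
    (fun res kv =>
      -- cnt = sum(1 for f in fixtures if f.get("team") == k and int(f.get("round", 0)) >= current_round)
      let cnt : Int :=
        ((fds.filter (fun f => f.get? "team" == some kv.1 && decide (pvRound f ≥ current_round))).map
          (fun _ => (1 : Int))).sum
      res ++ [(kv.1, if cnt > 0 then cnt else pvFallback kv.2)]) []

-- ===== PRECONDITION & SPEC =====
-- the effective per-team fixture count (a countP over the input, used by Pre_ and the proofs)
def pvCnt (fixtures : List (List (String × String))) (cr : Int) (k : String) : Int :=
  (fixtures.countP (fun f => (PySem.Dict.ofList f).get? "team" == some k &&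
    decide (pvRound (PySem.Dict.ofList f) ≥ cr)) : Int)

-- Python raises ValueError when int() is applied to a non-int-like string.  Both A and B
-- apply int() exactly to (a) the effective "round" value of every fixture whose team is a key of
-- teams, and (b) the effective non-empty "GamesRemaining" value of every team whose counted
-- fixtures are zero (A because remaining[k] == 0 then, B because the else-branch is only
-- evaluated then).  Pre_ excludes exactly those inputs, on which both programs raise.
def Pre_games_remaining (teams : List (String × List (String × String))) (fixtures : List (List (String × String))) (current_round : Int) : Prop :=
  (∀ f ∈ fixtures, ∀ t, (PySem.Dict.ofList f).get? "team" = some t → t ∈ teams.map (·.1) →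
    ∀ s, (PySem.Dict.ofList f).get? "round" = some s → (PySem.Int.ofStr? s).isSome) ∧
  (∀ t ∈ teams, pvCnt fixtures current_round t.1 = 0 →
    ∀ s, (PySem.Dict.ofList t.2).get? "GamesRemaining" = some s →
      (s = "" ∨ (PySem.Int.ofStr? s).isSome))
instance (teams : List (String × List (String × String))) (fixtures : List (List (String × String))) (current_round : Int) : Decidable (Pre_games_remaining teams fixtures current_round) := by unfold Pre_games_remaining; infer_instance

def pvWitness_games_remaining : (List (String × List (String × String))) × (List (List (String × String))) × Int :=
  ([("A", [("GamesRemaining", "3")]), ("B", [])],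
   [[("team", "A"), ("round", "2")], [("team", "C"), ("round", "5")]], 2)

def Spec_games_remaining (teams : List (String × List (String × String))) (fixtures : List (List (String × String))) (current_round : Int) (out : List (String × Int)) : Prop := out = games_remaining_alt teams fixtures current_round
instance (teams : List (String × List (String × String))) (fixtures : List (List (String × String))) (current_round : Int) (out : List (String × Int)) : Decidable (Spec_games_remaining teams fixtures current_round out) := by unfold Spec_games_remaining; infer_instance

-- ===== CLAIM (what is proved, stated in full; the proofs are below) =====
def Claim_equal_games_remaining : Prop := ∀ (teams : List (String × List (String × String))) (fixtures : List (List (String × String))) (current_round : Int), Dom_games_remaining teams fixtures current_round → Pre_games_remaining teams fixtures current_round → Spec_games_remaining teams fixtures current_round (games_remaining teams fixtures current_round)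

-- ===== LEMMAS AND PROOFS =====

theorem pvCnt_nonneg (fixtures : List (List (String × String))) (cr : Int) (k : String) :
    0 ≤ pvCnt fixtures cr k := by
  unfold pvCnt; positivity

-- B's sum of ones is pvCnt
theorem b_cnt_eq (fixtures : List (List (String × String))) (cr : Int) (k : String) :
    (((fixtures.map (fun f => PySem.Dict.ofList f)).filter
        (fun f => f.get? "team" == some k && decide (pvRound f ≥ cr))).map
      (fun _ => (1 : Int))).sum = pvCnt fixtures cr k := by
  rw [PySem.List.sum_map_const_int, mul_one, ← List.countP_eq_length_filter, List.countP_map, pvCnt]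
  rfl

-- A's fixture loop: keys are preserved and each present key accumulates pvCnt
theorem phase1 (cr : Int) (fixtures : List (List (String × String)))
    (rem : PySem.Dict String Int) :
    (fixtures.foldl (fun rem f =>
      match (PySem.Dict.ofList f).get? "team" with
      | none => rem
      | some team =>
        if rem.contains team then
          if pvRound (PySem.Dict.ofList f) ≥ cr then rem.modify team 0 (· + 1) else rem
        else rem) rem).keys = rem.keys ∧
    ∀ k ∈ rem.keys, (fixtures.foldl (fun rem f =>
      match (PySem.Dict.ofList f).get? "team" with
      | none => rem
      | some team =>
        if rem.contains team then
          if pvRound (PySem.Dict.ofList f) ≥ cr then rem.modify team 0 (· + 1) else rem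
        else rem) rem).getD k 0 = rem.getD k 0 + pvCnt fixtures cr k := by
  induction fixtures generalizing rem with
  | nil => exact ⟨rfl, fun k _ => by simp [pvCnt]⟩
  | cons f fixtures ih =>
    simp only [List.foldl_cons]
    cases hteam : (PySem.Dict.ofList f).get? "team" with
    | none =>
      dsimp only
      refine ⟨(ih rem).1, fun k hk => ?_⟩
      rw [(ih rem).2 k hk]
      simp [pvCnt, hteam]
    | some t =>
      dsimp only
      by_cases hc : rem.contains t
      · by_cases hr : pvRound (PySem.Dict.ofList f) ≥ cr
        · rw [if_pos hc, if_pos hr]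
          have hkeys : (rem.modify t 0 (· + 1)).keys = rem.keys := by
            rw [PySem.Dict.keys_modify, PySem.Dict.keys_insert_of_contains _ _ hc]
          refine ⟨by rw [(ih _).1, hkeys], fun k hk => ?_⟩
          rw [(ih _).2 k (by rw [hkeys]; exact hk)]
          rw [PySem.Dict.getD_modify]
          simp only [pvCnt, List.countP_cons, hteam]
          by_cases hkt : k = t
          · subst hkt
            simp [hr]
            ring
          · simp [hkt, Ne.symm hkt]
        · rw [if_pos hc, if_neg hr]
          refine ⟨(ih rem).1, fun k hk => ?_⟩
          rw [(ih rem).2 k hk]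
          simp [pvCnt, hr]
      · rw [if_neg hc]
        refine ⟨(ih rem).1, fun k hk => ?_⟩
        rw [(ih rem).2 k hk]
        have hne : t ≠ k := by
          intro h; subst h
          exact absurd ((PySem.Dict.contains_iff_mem_keys rem t).2 hk) (by simp [hc]) 
        simp [pvCnt, hteam, hne]

-- A's fallback loop: keys preserved, untouched keys unchanged, each listed key gets its fallback
theorem phase2 (L : List (String × List (String × String))) (rem : PySem.Dict String Int)
    (hnd : (L.map (·.1)).Nodup) (hsub : ∀ kv ∈ L, kv.1 ∈ rem.keys) :
    (L.foldl (fun rem kv =>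
      if rem.getD kv.1 0 = 0 then rem.insert kv.1 (pvFallback kv.2) else rem) rem).keys = rem.keys ∧
    (∀ k, k ∉ L.map (·.1) → (L.foldl (fun rem kv =>
      if rem.getD kv.1 0 = 0 then rem.insert kv.1 (pvFallback kv.2) else rem) rem).getD k 0 = rem.getD k 0) ∧
    ∀ kv ∈ L, (L.foldl (fun rem kv =>
      if rem.getD kv.1 0 = 0 then rem.insert kv.1 (pvFallback kv.2) else rem) rem).getD kv.1 0 =
      (if rem.getD kv.1 0 = 0 then pvFallback kv.2 else rem.getD kv.1 0) := by
  induction L generalizing rem with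
  | nil => exact ⟨rfl, fun _ _ => rfl, fun kv h => absurd h (List.not_mem_nil)⟩
  | cons kv L ih =>
    simp only [List.foldl_cons]
    rw [List.map_cons, List.nodup_cons] at hnd
    have hmem : kv.1 ∈ rem.keys := hsub kv (List.mem_cons_self)
    have hcon : rem.contains kv.1 = true := (PySem.Dict.contains_iff_mem_keys rem kv.1).2 hmem
    have hnotin : kv.1 ∉ L.map (·.1) := hnd.1
    set rem' := if rem.getD kv.1 0 = 0 then rem.insert kv.1 (pvFallback kv.2) else rem with hrem'
    have hkeys' : rem'.keys = rem.keys := by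
      rw [hrem']; split
      · exact PySem.Dict.keys_insert_of_contains rem _ hcon
      · rfl
    have hgetD_ne : ∀ k, k ≠ kv.1 → rem'.getD k 0 = rem.getD k 0 := by
      intro k hk
      rw [hrem']; split
      · rw [PySem.Dict.getD_insert]; simp [hk]
      · rfl
    have hgetD_self : rem'.getD kv.1 0 = (if rem.getD kv.1 0 = 0 then pvFallback kv.2 else rem.getD kv.1 0) := by
      rw [hrem']; split
      · rw [PySem.Dict.getD_insert]; simp
      · rfl
    obtain ⟨ik, iu, iv⟩ := ih rem' hnd.2
      (fun kv' h => by rw [hkeys']; exact hsub kv' (List.mem_cons_of_mem _ h))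
    refine ⟨by rw [ik, hkeys'], ?_, ?_⟩
    · intro k hk
      have hk1 : k ≠ kv.1 := by simp at hk; exact hk.1
      have hk2 : k ∉ L.map (·.1) := by simp at hk ⊢; intro b hb; exact (hk.2 b hb)
      rw [iu k hk2, hgetD_ne k hk1]
    · intro kv' hkv'
      rcases List.mem_cons.1 hkv' with h | h
      · subst h
        rw [iu kv'.1 hnotin, hgetD_self]
      · have hne : kv'.1 ≠ kv.1 := by
          intro he
          exact hnotin (he ▸ List.mem_map_of_mem h)
        rw [iv kv' h, hgetD_ne kv'.1 hne]

-- ===== VERDICT (by name: the statement is the Claim_ definition above) =====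
theorem games_remaining_spec : Claim_equal_games_remaining := by
  intro teams fixtures cr _ _
  unfold Spec_games_remaining games_remaining games_remaining_alt
  have hndK := PySem.Dict.nodup_keys_ofList teams
  have hkeysT : (PySem.Dict.ofList teams).items.map (·.1) = (PySem.Dict.ofList teams).keys := rfl
  have hndT : ((PySem.Dict.ofList teams).items.map (·.1)).Nodup := by rw [hkeysT]; exact hndK
  -- the zero-initialised dict
  have h0 : ((PySem.Dict.ofList teams).items.foldl (fun d kv => d.insert kv.1 (0 : Int))
      PySem.Dict.empty).items = (PySem.Dict.ofList teams).items.map (fun kv => (kv.1, (0 : Int))) := by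
    rw [PySem.Dict.items_foldl_insert_fresh (PySem.Dict.ofList teams).items (·.1) (fun _ => (0 : Int))
      PySem.Dict.empty (fun a _ => PySem.Dict.contains_empty a.1) hndT]
    rfl
  have r0keys : ((PySem.Dict.ofList teams).items.foldl (fun d kv => d.insert kv.1 (0 : Int))
      PySem.Dict.empty).keys = (PySem.Dict.ofList teams).keys := by
    show ((PySem.Dict.ofList teams).items.foldl (fun d kv => d.insert kv.1 (0 : Int))
      PySem.Dict.empty).items.map (·.1) = _
    rw [h0, List.map_map, ← hkeysT]
    rfl
  have r0getD : ∀ kv ∈ (PySem.Dict.ofList teams).items,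
      ((PySem.Dict.ofList teams).items.foldl (fun d kv => d.insert kv.1 (0 : Int))
        PySem.Dict.empty).getD kv.1 0 = 0 := by
    intro kv hkv
    exact PySem.Dict.getD_of_mem_items _ (by rw [h0]; exact List.mem_map_of_mem hkv)
      (by rw [r0keys]; exact hndK) 0
  dsimp only
  rw [PySem.List.foldl_append_singleton_eq_map, List.nil_append]
  obtain ⟨p1k, p1v⟩ := phase1 cr fixtures
    ((PySem.Dict.ofList teams).items.foldl (fun d kv => d.insert kv.1 (0 : Int)) PySem.Dict.empty)
  obtain ⟨p2k, p2u, p2v⟩ := phase2 (PySem.Dict.ofList teams).items _ hndT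
    (fun kv hkv => by rw [p1k, r0keys, ← hkeysT]; exact List.mem_map_of_mem hkv)
  rw [PySem.Dict.items_eq_map_keys _ (by rw [p2k, p1k, r0keys]; exact hndK) 0]
  rw [p2k, p1k, r0keys, ← hkeysT, List.map_map]
  apply List.map_congr_left
  intro kv hkv
  simp only [Function.comp_apply]
  rw [p2v kv hkv,
    p1v kv.1 (by rw [r0keys, ← hkeysT]; exact List.mem_map_of_mem hkv),
    r0getD kv hkv, zero_add, b_cnt_eq]
  have hnn := pvCnt_nonneg fixtures cr kv.1
  by_cases h : pvCnt fixtures cr kv.1 = 0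
  · simp [h]
  · rw [if_neg h, if_pos (lt_of_le_of_ne hnn (Ne.symm h))]
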